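-- pv_equiv track=rewrite | github.com/NVIDIA/NVFlare | ci/check_relative_doc_links.py | _mask_markdown_code_spans
-- ===== SOURCE A (Python) =====
-- def _mask_preserving_newlines(text: str) -> str:
--     return "".join("\n" if char == "\n" else " " for char in text)
--
-- def _find_matching_code_span(text: str, start_index: int, delimiter_len: int) -> int | None:
--     index = start_index
--     while index < len(text):
--         if text[index] != "`":
--             index += 1
--             continue
--
--         run_len = 1
--         while index + run_len < len(text) and text[index + run_len] == "`":
--             run_len += 1
--
--         if run_len == delimiter_len:
--             return index
--
--         index += run_len
--
--     return None
--
-- def _mask_markdown_code_spans(text: str) -> str: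
--     masked_parts = []
--     index = 0
--
--     while index < len(text):
--         if text[index] != "`":
--             masked_parts.append(text[index])
--             index += 1
--             continue
--
--         delimiter_len = 1
--         while index + delimiter_len < len(text) and text[index + delimiter_len] == "`":
--             delimiter_len += 1
--
--         closing_index = _find_matching_code_span(text, index + delimiter_len, delimiter_len)
--         if closing_index is None:
--             masked_parts.append(text[index : index + delimiter_len])
--             index += delimiter_len
--             continue
--
--         span_end = closing_index + delimiter_len
--         masked_parts.append(_mask_preserving_newlines(text[index:span_end]))
--         index = span_end
--
--     return "".join(masked_parts)
-- ===== SOURCE B (Python) =====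
-- def _mask_preserving_newlines(text: str) -> str:
--     return "".join("\n" if char == "\n" else " " for char in text)
--
-- def _mask_markdown_code_spans(text: str) -> str:
--     # Tokenize once into maximal runs of backticks / non-backticks, then match
--     # delimiter runs at the token level in a single forward pass.
--     tokens = []
--     i, n = 0, len(text)
--     while i < n:
--         is_bt = text[i] == "`"
--         j = i
--         while j < n and (text[j] == "`") == is_bt:
--             j += 1
--         tokens.append(text[i:j])
--         i = j
--     out = []
--     t, m = 0, len(tokens)
--     while t < m:
--         tok = tokens[t]
--         if not tok.startswith("`"):
--             out.append(tok)
--             t += 1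
--             continue
--         d = len(tok)
--         j = t + 1
--         while j < m and not (tokens[j].startswith("`") and len(tokens[j]) == d):
--             j += 1
--         if j == m:
--             out.append(tok)
--             t += 1
--         else:
--             out.append(_mask_preserving_newlines("".join(tokens[t : j + 1])))
--             t = j + 1
--     return "".join(out)
-- ===== Notes on version B (the rewrite author's own statement) =====
-- stated objective: alternative
-- what changed: Replaces A's character-level scan, which re-scans the tail character by character for a matching backtick run after every opening delimiter, with a single tokenization of the text into maximal backtick/non-backtick runs followed by one token-level matching pass.
import Mathlib
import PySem

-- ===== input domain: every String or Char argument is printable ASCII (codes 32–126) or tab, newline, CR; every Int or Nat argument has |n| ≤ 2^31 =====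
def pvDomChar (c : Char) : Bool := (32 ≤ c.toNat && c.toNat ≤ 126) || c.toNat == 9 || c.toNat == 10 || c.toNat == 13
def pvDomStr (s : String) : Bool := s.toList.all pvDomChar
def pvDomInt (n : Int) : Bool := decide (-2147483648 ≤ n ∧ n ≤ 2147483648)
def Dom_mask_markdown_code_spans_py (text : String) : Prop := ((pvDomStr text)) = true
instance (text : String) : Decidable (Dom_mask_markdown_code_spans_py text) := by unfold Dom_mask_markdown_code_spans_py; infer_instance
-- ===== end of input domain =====

-- B replaces A's character-by-character scan with repeated rescans by a single
-- tokenization into maximal backtick/non-backtick runs matched in one token-level pass.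

-- helper shared by both Pythons: _mask_preserving_newlines
def pvMaskNL (l : List Char) : List Char :=
  l.map (fun c => if c = '\n' then '\n' else ' ')

-- ===== PORT A =====
-- leading-backtick run length (A's `while … == "`"` counting loops)
def pvRunA : List Char → Nat
  | [] => 0
  | c :: t => if c = '`' then pvRunA t + 1 else 0

theorem pvRunA_pos (c : Char) (t : List Char) (h : c = '`') : 1 ≤ pvRunA (c :: t) := by
  simp [pvRunA, h]

-- _find_matching_code_span, returning the offset from start_index
def pvFindA (l : List Char) (d : Nat) : Option Nat :=
  match l with
  | [] => none
  | c :: t =>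
    if h : c = '`' then
      let r := pvRunA (c :: t)
      if r = d then some 0
      else (pvFindA (List.drop r (c :: t)) d).map (· + r)
    else (pvFindA t d).map (· + 1)
termination_by l.length
decreasing_by
  · have := pvRunA_pos c t h; simp [List.length_drop]; omega
  · simp

-- _mask_markdown_code_spans (A)
def pvMaskA (l : List Char) : List Char :=
  match l with
  | [] => []
  | c :: t =>
    if h : c = '`' then
      let d := pvRunA (c :: t)
      match pvFindA (List.drop d (c :: t)) d with
      | none => List.take d (c :: t) ++ pvMaskA (List.drop d (c :: t))
      | some k =>
        pvMaskNL (List.take (d + k + d) (c :: t)) ++ pvMaskA (List.drop (d + k + d) (c :: t))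
    else c :: pvMaskA t
termination_by l.length
decreasing_by
  · have := pvRunA_pos c t h; simp [List.length_drop]; omega
  · have := pvRunA_pos c t h; simp [List.length_drop]; omega
  · simp

def mask_markdown_code_spans_py (text : String) : String :=
  String.ofList (pvMaskA text.toList)

-- ===== PORT B =====
-- tokenize into maximal runs of backticks / non-backticks
def pvTokB (l : List Char) : List (List Char) :=
  match l with
  | [] => []
  | c :: t =>
    (c :: t.takeWhile (fun x => (x = '`') = (c = '`'))) ::
      pvTokB (t.dropWhile (fun x => (x = '`') = (c = '`')))
termination_by l.length
decreasing_by
  have := List.length_dropWhile_le (fun x => decide ((x = '`') = (c = '`'))) t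
  simp at *; omega

-- forward search for the first run token of length d: (tokens before, match, tokens after)
def pvFindTokB (d : Nat) : List (List Char) → Option (List (List Char) × List Char × List (List Char))
  | [] => none
  | tk :: rest =>
    if tk.head? = some '`' ∧ tk.length = d then some ([], tk, rest)
    else (pvFindTokB d rest).map (fun pmq => (tk :: pmq.1, pmq.2.1, pmq.2.2))

theorem pvFindTokB_len (d : Nat) : ∀ (r p : List (List Char)) (m : List Char) (q : List (List Char)),
    pvFindTokB d r = some (p, m, q) → q.length < r.length := by
  intro r
  induction r with
  | nil => intro p m q h; simp [pvFindTokB] at h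
  | cons tk rest ih =>
    intro p m q h
    rw [pvFindTokB] at h
    split at h
    · simp at h
      obtain ⟨_, _, h3⟩ := h
      subst h3; simp
    · cases hr : pvFindTokB d rest with
      | none => simp [hr] at h
      | some pmq =>
        obtain ⟨p', m', q'⟩ := pmq
        simp [hr] at h
        obtain ⟨h1, h2, h3⟩ := h
        subst h3
        have := ih p' m' q' hr
        simp; omega

-- main token-level pass of B
def pvGoB (ts : List (List Char)) : List Char :=
  match ts with
  | [] => []
  | tk :: rest =>
    if tk.head? = some '`' then
      match hf : pvFindTokB tk.length rest with
      | none => tk ++ pvGoB rest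
      | some (p, m, q) => pvMaskNL (tk ++ p.flatten ++ m) ++ pvGoB q
    else tk ++ pvGoB rest
termination_by ts.length
decreasing_by
  · simp
  · have := pvFindTokB_len tk.length rest p m q hf; simp; omega
  · simp

def mask_markdown_code_spans_py_alt (text : String) : String :=
  String.ofList (pvGoB (pvTokB text.toList))

-- ===== PRECONDITION & SPEC =====
def Spec_mask_markdown_code_spans_py (text : String) (out : String) : Prop := out = mask_markdown_code_spans_py_alt text
instance (text : String) (out : String) : Decidable (Spec_mask_markdown_code_spans_py text out) := by unfold Spec_mask_markdown_code_spans_py; infer_instance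

-- ===== CLAIM (what is proved, stated in full; the proofs are below) =====
def Claim_equal_mask_markdown_code_spans_py : Prop := ∀ (text : String), Dom_mask_markdown_code_spans_py text → Spec_mask_markdown_code_spans_py text (mask_markdown_code_spans_py text)

-- ===== LEMMAS AND PROOFS =====

theorem pvRunA_eq (t : List Char) :
    pvRunA t = (t.takeWhile (fun x => decide (x = '`'))).length := by
  induction t with
  | nil => simp [pvRunA]
  | cons a s ih =>
    by_cases ha : a = '`' <;> simp [pvRunA, ha, List.takeWhile, ih]

theorem pred_bt (c : Char) (hc : c = '`') :
    (fun x : Char => decide ((x = '`') = (c = '`'))) = (fun x => decide (x = '`')) := by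
  subst hc; funext x; by_cases hx : x = '`' <;> simp [hx]

theorem pred_nb (c : Char) (hc : ¬ c = '`') :
    (fun x : Char => decide ((x = '`') = (c = '`'))) = (fun x => !decide (x = '`')) := by
  funext x; by_cases hx : x = '`' <;> simp [hx, hc]

theorem pvMaskA_append_nb : ∀ (s r : List Char), (∀ x ∈ s, ¬ x = '`') →
    pvMaskA (s ++ r) = s ++ pvMaskA r := by
  intro s
  induction s with
  | nil => intro r _; simp
  | cons a s' ih =>
    intro r h
    have ha : ¬ a = '`' := h a (by simp)
    rw [List.cons_append, pvMaskA]
    simp [ha]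
    exact ih r (fun x hx => h x (by simp [hx]))

theorem pvFindA_append_nb : ∀ (s r : List Char) (d : Nat), (∀ x ∈ s, ¬ x = '`') →
    pvFindA (s ++ r) d = (pvFindA r d).map (· + s.length) := by
  intro s
  induction s with
  | nil => intro r d _; cases h : pvFindA r d <;> simp [h]
  | cons a s' ih =>
    intro r d h
    have ha : ¬ a = '`' := h a (by simp)
    rw [List.cons_append, pvFindA]
    simp [ha]
    rw [ih r d (fun x hx => h x (by simp [hx]))]
    cases h : pvFindA r d <;> simp [h]; omega

theorem take_app_len {α : Type} (l₁ : List α) (l₂ : List α) (k : Nat) :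
    (l₁ ++ l₂).take (l₁.length + k) = l₁ ++ l₂.take k := by
  induction l₁ with
  | nil => simp
  | cons a s ih => simpa [Nat.succ_add] using ih

theorem drop_app_len {α : Type} (l₁ : List α) (l₂ : List α) (k : Nat) :
    (l₁ ++ l₂).drop (l₁.length + k) = l₂.drop k := by
  induction l₁ with
  | nil => simp
  | cons a s ih => simpa [Nat.succ_add] using ih

theorem pv_mem_takeWhile {α : Type} (p : α → Bool) : ∀ (l : List α) (x : α), x ∈ l.takeWhile p → p x = true := by
  intro l
  induction l with
  | nil => intro x hx; simp at hx
  | cons a s ih =>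
    intro x hx
    rw [List.takeWhile_cons] at hx
    by_cases hp : p a = true
    · rw [if_pos hp] at hx
      rcases List.mem_cons.mp hx with h | h
      · subst h; exact hp
      · exact ih x h
    · rw [if_neg hp] at hx; simp at hx

theorem pvMatchCorr : ∀ (n : Nat) (r : List Char) (d : Nat), r.length ≤ n → 1 ≤ d →
    ((pvFindTokB d (pvTokB r) = none → pvFindA r d = none) ∧
     (∀ p m q, pvFindTokB d (pvTokB r) = some (p, m, q) →
        pvFindA r d = some p.flatten.length ∧
        List.take (p.flatten.length + d) r = p.flatten ++ m ∧
        pvTokB (List.drop (p.flatten.length + d) r) = q)) := by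
  intro n
  induction n with
  | zero =>
    intro r d hr _
    have : r = [] := List.eq_nil_of_length_eq_zero (Nat.le_zero.mp hr)
    subst this
    exact ⟨fun _ => by simp [pvFindA], fun p m q h => by simp [pvTokB, pvFindTokB] at h⟩
  | succ n ih =>
    intro r d hr hd
    match r with
    | [] =>
      exact ⟨fun _ => by simp [pvFindA], fun p m q h => by simp [pvTokB, pvFindTokB] at h⟩
    | c :: t =>
      rw [pvTokB]
      by_cases hc : c = '`'
      · subst hc
        rw [pred_bt '`' rfl]
        have ht : t = t.takeWhile (fun x => decide (x = '`')) ++ t.dropWhile (fun x => decide (x = '`')) :=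
          (List.takeWhile_append_dropWhile).symm
        set a := t.takeWhile (fun x => decide (x = '`')) with ha_def
        set b := t.dropWhile (fun x => decide (x = '`')) with hb_def
        have hrun : pvRunA ('`' :: t) = a.length + 1 := by
          simp [pvRunA, pvRunA_eq t, ha_def]
        have hb_len : b.length ≤ n := by
          have h1 : b.length ≤ t.length := by
            rw [hb_def]; exact List.length_dropWhile_le _ t
          simp at hr; omega
        have htake : ∀ k, List.take (a.length + 1 + k) ('`' :: t) = '`' :: a ++ List.take k b := by
          intro k
          conv_lhs => rw [ht]
          have h2 : a.length + 1 + k = ('`' :: a).length + k := by simp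
          rw [show ('`' :: (a ++ b)) = ('`' :: a) ++ b from by simp, h2, take_app_len]
        have hdrop : ∀ k, List.drop (a.length + 1 + k) ('`' :: t) = List.drop k b := by
          intro k
          conv_lhs => rw [ht]
          have h2 : a.length + 1 + k = ('`' :: a).length + k := by simp
          rw [show ('`' :: (a ++ b)) = ('`' :: a) ++ b from by simp, h2, drop_app_len]
        have htake0 : List.take (a.length + 1) ('`' :: t) = '`' :: a := by simpa using htake 0
        have hdrop0 : List.drop (a.length + 1) ('`' :: t) = b := by simpa using hdrop 0
        by_cases hd2 : a.length + 1 = d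
        · constructor
          · intro h
            rw [pvFindTokB] at h
            simp [hd2] at h
          · intro p m q h
            rw [pvFindTokB] at h
            rw [if_pos (by simp [hd2])] at h
            simp at h
            obtain ⟨hp, hm, hq⟩ := h
            subst p; subst m; subst q
            refine ⟨?_, ?_, ?_⟩
            · rw [pvFindA]; simp [hrun, hd2]
            · rw [← hd2]; simpa using htake0
            · rw [← hd2]; simpa [hdrop0] using rfl
        · have hcond : ¬(('`' :: a).head? = some '`' ∧ ('`' :: a).length = d) := by
            simp; omega
          have hfa : pvFindA ('`' :: t) d = (pvFindA b d).map (· + (a.length + 1)) := by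
            rw [pvFindA]
            simp [hrun, hd2, hdrop0]
          obtain ⟨ih1, ih2⟩ := ih b d hb_len hd
          constructor
          · intro h
            rw [pvFindTokB, if_neg hcond] at h
            simp at h
            rw [hfa, ih1 h]; rfl
          · intro p m q h
            rw [pvFindTokB, if_neg hcond] at h
            cases hrec : pvFindTokB d (pvTokB b) with
            | none => rw [hrec] at h; simp at h
            | some pmq =>
              obtain ⟨p', m', q'⟩ := pmq
              rw [hrec] at h
              simp at h
              obtain ⟨hp, hm, hq⟩ := h
              subst p; subst m; subst q
              obtain ⟨k1, k2, k3⟩ := ih2 p' m' q' hrec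
              refine ⟨?_, ?_, ?_⟩
              · rw [hfa, k1]; simp; omega
              · have h2 : ((('`' :: a) :: p').flatten).length + d
                    = a.length + 1 + (p'.flatten.length + d) := by simp; omega
                rw [h2, htake, k2]; simp
              · have h2 : ((('`' :: a) :: p').flatten).length + d
                    = a.length + 1 + (p'.flatten.length + d) := by simp; omega
                rw [h2, hdrop, k3]
      · rw [pred_nb c hc]
        have ht : t = t.takeWhile (fun x => !decide (x = '`')) ++ t.dropWhile (fun x => !decide (x = '`')) :=
          (List.takeWhile_append_dropWhile).symm
        set a := t.takeWhile (fun x => !decide (x = '`')) with ha_def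
        set b := t.dropWhile (fun x => !decide (x = '`')) with hb_def
        have hnb : ∀ x ∈ c :: a, ¬ x = '`' := by
          intro x hx
          rcases List.mem_cons.mp hx with h | h
          · subst h; exact hc
          · rw [ha_def] at h
            have h2 := pv_mem_takeWhile (fun x => !decide (x = '`')) t x h
            simpa using h2
        have hb_len : b.length ≤ n := by
          have h1 : b.length ≤ t.length := by
            rw [hb_def]; exact List.length_dropWhile_le _ t
          simp at hr; omega
        have htake : ∀ k, List.take (a.length + 1 + k) (c :: t) = c :: a ++ List.take k b := by
          intro k
          conv_lhs => rw [ht]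
          have h2 : a.length + 1 + k = (c :: a).length + k := by simp
          rw [show (c :: (a ++ b)) = (c :: a) ++ b from by simp, h2, take_app_len]
        have hdrop : ∀ k, List.drop (a.length + 1 + k) (c :: t) = List.drop k b := by
          intro k
          conv_lhs => rw [ht]
          have h2 : a.length + 1 + k = (c :: a).length + k := by simp
          rw [show (c :: (a ++ b)) = (c :: a) ++ b from by simp, h2, drop_app_len]
        have hcond : ¬((c :: a).head? = some '`' ∧ (c :: a).length = d) := by
          simp [hc]
        have hfa : pvFindA (c :: t) d = (pvFindA b d).map (· + (a.length + 1)) := by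
          conv_lhs => rw [ht, show (c :: (a ++ b)) = (c :: a) ++ b from by simp]
          rw [pvFindA_append_nb (c :: a) b d hnb]
          simp
        obtain ⟨ih1, ih2⟩ := ih b d hb_len hd
        constructor
        · intro h
          rw [pvFindTokB, if_neg hcond] at h
          simp at h
          rw [hfa, ih1 h]; rfl
        · intro p m q h
          rw [pvFindTokB, if_neg hcond] at h
          cases hrec : pvFindTokB d (pvTokB b) with
          | none => rw [hrec] at h; simp at h
          | some pmq =>
            obtain ⟨p', m', q'⟩ := pmq
            rw [hrec] at h
            simp at h
            obtain ⟨hp, hm, hq⟩ := h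
            subst p; subst m; subst q
            obtain ⟨k1, k2, k3⟩ := ih2 p' m' q' hrec
            refine ⟨?_, ?_, ?_⟩
            · rw [hfa, k1]; simp; omega
            · have h2 : (((c :: a) :: p').flatten).length + d
                  = a.length + 1 + (p'.flatten.length + d) := by simp; omega
              rw [h2, htake, k2]; simp
            · have h2 : (((c :: a) :: p').flatten).length + d
                  = a.length + 1 + (p'.flatten.length + d) := by simp; omega
              rw [h2, hdrop, k3]

theorem pvMainAux : ∀ (n : Nat) (l : List Char), l.length ≤ n → pvMaskA l = pvGoB (pvTokB l) := by
  intro n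
  induction n with
  | zero =>
    intro l hl
    have : l = [] := List.eq_nil_of_length_eq_zero (Nat.le_zero.mp hl)
    subst this; simp [pvMaskA, pvTokB, pvGoB]
  | succ n ih =>
    intro l hl
    match l with
    | [] => simp [pvMaskA, pvTokB, pvGoB]
    | c :: t =>
      rw [pvTokB]
      by_cases hc : c = '`'
      · subst hc
        rw [pred_bt '`' rfl]
        have ht : t = t.takeWhile (fun x => decide (x = '`')) ++ t.dropWhile (fun x => decide (x = '`')) :=
          (List.takeWhile_append_dropWhile).symm
        set a := t.takeWhile (fun x => decide (x = '`')) with ha_def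
        set b := t.dropWhile (fun x => decide (x = '`')) with hb_def
        have hrun : pvRunA ('`' :: t) = a.length + 1 := by
          simp [pvRunA, pvRunA_eq t, ha_def]
        have hb_len : b.length ≤ n := by
          have h1 : b.length ≤ t.length := by
            rw [hb_def]; exact List.length_dropWhile_le _ t
          simp at hl; omega
        have htake : ∀ k, List.take (a.length + 1 + k) ('`' :: t) = '`' :: a ++ List.take k b := by
          intro k
          conv_lhs => rw [ht]
          have h2 : a.length + 1 + k = ('`' :: a).length + k := by simp
          rw [show ('`' :: (a ++ b)) = ('`' :: a) ++ b from by simp, h2, take_app_len]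
        have hdrop : ∀ k, List.drop (a.length + 1 + k) ('`' :: t) = List.drop k b := by
          intro k
          conv_lhs => rw [ht]
          have h2 : a.length + 1 + k = ('`' :: a).length + k := by simp
          rw [show ('`' :: (a ++ b)) = ('`' :: a) ++ b from by simp, h2, drop_app_len]
        have htake0 : List.take (a.length + 1) ('`' :: t) = '`' :: a := by simpa using htake 0
        have hdrop0 : List.drop (a.length + 1) ('`' :: t) = b := by simpa using hdrop 0
        obtain ⟨ih1, ih2⟩ := pvMatchCorr n b (a.length + 1) hb_len (by omega)
        cases hft : pvFindTokB (('`' :: a).length) (pvTokB b) with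
        | none =>
          have heq : pvFindA b (a.length + 1) = none := ih1 (by simpa using hft)
          have hgo : pvGoB (('`' :: a) :: pvTokB b) = ('`' :: a) ++ pvGoB (pvTokB b) := by
            simp only [pvGoB]
            rw [if_pos (by simp)]
            split
            · simp
            · rename_i p' m' q' heq
              rw [show pvFindTokB (('`' :: a).length) (pvTokB b) = none from hft] at heq
              simp at heq
          rw [pvMaskA, dif_pos rfl]
          simp only [hrun, hdrop0, heq]
          rw [htake0, hgo, ih b hb_len]
        | some pmq =>
          obtain ⟨p, m2, q⟩ := pmq
          have hft' : pvFindTokB (a.length + 1) (pvTokB b) = some (p, m2, q) := by simpa using hft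
          obtain ⟨k1, k2, k3⟩ := ih2 p m2 q hft'
          have hgo : pvGoB (('`' :: a) :: pvTokB b)
              = pvMaskNL (('`' :: a) ++ p.flatten ++ m2) ++ pvGoB q := by
            simp only [pvGoB]
            rw [if_pos (by simp)]
            split
            · rename_i heq
              rw [show pvFindTokB (('`' :: a).length) (pvTokB b) = some (p, m2, q) from hft] at heq
              simp at heq
            · rename_i p' m' q' heq
              rw [show pvFindTokB (('`' :: a).length) (pvTokB b) = some (p, m2, q) from hft] at heq
              simp at heq
              obtain ⟨rfl, rfl, rfl⟩ := heq
              simp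
          have hlen2 : (List.drop (p.flatten.length + (a.length + 1)) b).length ≤ n := by
            simp
            omega
          rw [pvMaskA, dif_pos rfl]
          simp only [hrun, hdrop0, k1]
          have harith : a.length + 1 + p.flatten.length + (a.length + 1)
              = a.length + 1 + (p.flatten.length + (a.length + 1)) := by omega
          rw [harith, htake (p.flatten.length + (a.length + 1)),
              hdrop (p.flatten.length + (a.length + 1)), k2,
              ih (List.drop (p.flatten.length + (a.length + 1)) b) hlen2, k3, hgo]
          simp
      · rw [pred_nb c hc]
        have ht : t = t.takeWhile (fun x => !decide (x = '`')) ++ t.dropWhile (fun x => !decide (x = '`')) :=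
          (List.takeWhile_append_dropWhile).symm
        set a := t.takeWhile (fun x => !decide (x = '`')) with ha_def
        set b := t.dropWhile (fun x => !decide (x = '`')) with hb_def
        have hnb : ∀ x ∈ c :: a, ¬ x = '`' := by
          intro x hx
          rcases List.mem_cons.mp hx with h | h
          · subst h; exact hc
          · rw [ha_def] at h
            have h2 := pv_mem_takeWhile (fun x => !decide (x = '`')) t x h
            simpa using h2
        have hb_len : b.length ≤ n := by
          have h1 : b.length ≤ t.length := by
            rw [hb_def]; exact List.length_dropWhile_le _ t
          simp at hl; omega
        have hsplit : c :: t = (c :: a) ++ b := by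
          conv_lhs => rw [ht]
          simp
        have hgo : pvGoB ((c :: a) :: pvTokB b) = (c :: a) ++ pvGoB (pvTokB b) := by
          rw [pvGoB, if_neg (by simp [hc])]
        conv_lhs => rw [hsplit]
        rw [pvMaskA_append_nb (c :: a) b hnb, hgo, ih b hb_len]

theorem main_equiv : ∀ (l : List Char), pvMaskA l = pvGoB (pvTokB l) := by
  intro l
  exact pvMainAux l.length l (Nat.le_refl _)

-- ===== VERDICT (by name: the statement is the Claim_ definition above) =====
theorem mask_markdown_code_spans_py_spec : Claim_equal_mask_markdown_code_spans_py := by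
  intro text _
  unfold Spec_mask_markdown_code_spans_py mask_markdown_code_spans_py mask_markdown_code_spans_py_alt
  rw [main_equiv]
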